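-- pv_equiv track=rewrite | github.com/cxurescry/fr-me | for uni /ОПП (Python) /lab2 /main.py | replace_colums
-- ===== SOURCE A (Python) =====
-- def replace_colums(xs):
--     rows = len(xs)
--     cols = len(xs[0])
--
--     last_pos = None # создаем переменную для тех индексов, где в последний раз увиделм строку и столбец
--     for i in range(rows):
--         for j in range(cols):
--             if xs[i][j] > 100:
--                 last_pos = (i, j)
--
--     target_col = last_pos[1] # запоминаем столбец
--
--     # в цикле для каждой строки 2 и наш столбец который щапомнили мкеякм местами
--     for i in range(rows):
--         xs[i][1], xs[i][target_col] = xs[i][target_col], xs[i][1]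
--
--     return xs
-- ===== SOURCE B (Python) =====
-- def replace_colums(xs):
--     cols = len(xs[0])
--     target_col = None
--     for row in reversed(xs):
--         hits = [j for j in range(cols) if row[j] > 100]
--         if hits:
--             target_col = hits[-1]
--             break
--     out = []
--     for row in xs:
--         r = list(row)
--         r[1], r[target_col] = r[target_col], r[1]
--         out.append(r)
--     return out
-- ===== Notes on version B (the rewrite author's own statement) =====
-- stated objective: faster
-- what changed: B replaces A's exhaustive forward row-major scan (keeping the last >100 position) by a reverse scan over the rows that stops at the first qualifying row and takes that row's last qualifying column, and replaces A's in-place column-swap loop by building fresh swapped rows; B does not mutate xs (A does; the claim is about the return value).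
import Mathlib
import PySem

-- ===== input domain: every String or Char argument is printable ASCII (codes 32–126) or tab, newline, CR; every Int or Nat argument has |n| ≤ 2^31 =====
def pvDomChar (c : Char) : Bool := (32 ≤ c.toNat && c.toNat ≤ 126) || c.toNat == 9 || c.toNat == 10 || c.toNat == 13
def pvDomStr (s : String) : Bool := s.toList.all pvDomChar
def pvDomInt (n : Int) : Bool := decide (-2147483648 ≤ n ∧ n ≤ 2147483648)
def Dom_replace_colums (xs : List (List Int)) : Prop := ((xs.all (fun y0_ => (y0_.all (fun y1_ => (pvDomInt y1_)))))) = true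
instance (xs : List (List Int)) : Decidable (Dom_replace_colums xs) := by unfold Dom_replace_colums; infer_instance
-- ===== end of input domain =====

-- B replaces A's exhaustive forward row-major scan by a reverse scan that stops at the first
-- qualifying row (taking that row's last qualifying column), and replaces A's in-place swap loop
-- by building fresh swapped rows; equivalence is about the RETURN value only (A mutates xs, B does not).

-- ===== PORT A =====
def replace_colums (xs : List (List Int)) : List (List Int) :=
  let rows : Int := (xs.length : Int)
  let cols : Int := (((PySem.List.pyGet? xs 0).getD []).length : Int)
  let last_pos : Option (Int × Int) :=
    (PySem.List.pyRange 0 rows 1).foldl (fun lp i =>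
      (PySem.List.pyRange 0 cols 1).foldl (fun lp j =>
        if 100 < PySem.List.pyGetD (PySem.List.pyGetD xs i []) j 0 then some (i, j) else lp) lp) none
  -- last_pos[1]: Prod.snd; the .getD 0 default is Python's TypeError on None, excluded by Pre_
  let target_col : Int := (last_pos.map Prod.snd).getD 0
  (PySem.List.pyRange 0 rows 1).foldl (fun acc i =>
    -- xs[i][1], xs[i][target_col] = xs[i][target_col], xs[i][1]
    let tmp1 := PySem.List.pyGetD (PySem.List.pyGetD acc i []) target_col 0
    let tmp2 := PySem.List.pyGetD (PySem.List.pyGetD acc i []) 1 0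
    let acc1 := PySem.List.pySetD acc i (PySem.List.pySetD (PySem.List.pyGetD acc i []) 1 tmp1)
    PySem.List.pySetD acc1 i (PySem.List.pySetD (PySem.List.pyGetD acc1 i []) target_col tmp2)) xs

-- ===== PORT B =====
-- hits = [j for j in range(cols) if row[j] > 100]   (indices are in range under Pre_)
def pvHits (row : List Int) (cols : Nat) : List Nat :=
  (List.range cols).filter (fun j => decide (100 < row.getD j 0))

-- for row in reversed(xs): if hits: target_col = hits[-1]; break   (applied to xs.reverse)
def pvFindTarget (rs : List (List Int)) (cols : Nat) : Option Nat :=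
  match rs with
  | [] => none
  | r :: rest =>
    match (pvHits r cols).getLast? with
    | some j => some j
    | none => pvFindTarget rest cols

-- r = list(row); r[1], r[t] = r[t], r[1]
def pvSwapRow (row : List Int) (t : Nat) : List Int :=
  let a := row.getD t 0
  let b := row.getD 1 0
  (row.set 1 a).set t b

def replace_colums_alt (xs : List (List Int)) : List (List Int) :=
  let cols := (xs.headD []).length
  match pvFindTarget xs.reverse cols with
  | some t => xs.map (fun row => pvSwapRow row t)
  | none => xs   -- Python raises TypeError (r[None]) here; excluded by Pre_

-- ===== PRECONDITION & SPEC =====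
-- Exactly the inputs on which Python A returns: a nonempty list whose first row has at least 2
-- entries, every row at least as long as the first (else IndexError during the scan or the swap),
-- and some entry among the first len(xs[0]) columns exceeds 100 (else last_pos is None: TypeError).
def Pre_replace_colums (xs : List (List Int)) : Prop :=
  xs ≠ [] ∧ 2 ≤ (xs.headD []).length ∧
  (∀ row ∈ xs, (xs.headD []).length ≤ row.length) ∧
  (∃ row ∈ xs, ∃ v ∈ row.take (xs.headD []).length, 100 < v)
instance (xs : List (List Int)) : Decidable (Pre_replace_colums xs) := by unfold Pre_replace_colums; infer_instance
def pvWitness_replace_colums : List (List Int) := [[0, 101], [1, 2]]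

def Spec_replace_colums (xs : List (List Int)) (out : List (List Int)) : Prop := out = replace_colums_alt xs
instance (xs : List (List Int)) (out : List (List Int)) : Decidable (Spec_replace_colums xs out) := by unfold Spec_replace_colums; infer_instance

-- ===== CLAIM (what is proved, stated in full; the proofs are below) =====
def Claim_equal_replace_colums : Prop := ∀ (xs : List (List Int)), Dom_replace_colums xs → Pre_replace_colums xs → Spec_replace_colums xs (replace_colums xs)

-- ===== LEMMAS AND PROOFS =====

theorem pvFindTarget_eq_findSome? (rs : List (List Int)) (cols : Nat) :
    pvFindTarget rs cols = rs.findSome? (fun r => (pvHits r cols).getLast?) := by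
  induction rs with
  | nil => rfl
  | cons r rest ih =>
    simp only [pvFindTarget, List.findSome?_cons, ih]
    cases (pvHits r cols).getLast? <;> rfl

theorem pv_findSome?_congr {α β : Type} (f g : α → Option β) (l : List α)
    (h : ∀ x ∈ l, f x = g x) : l.findSome? f = l.findSome? g := by
  induction l with
  | nil => rfl
  | cons x t ih =>
    simp only [List.findSome?_cons, h x (by simp)]
    cases g x with
    | some b => rfl
    | none => exact ih (fun y hy => h y (by simp [hy]))

-- A's inner column loop computes the last qualifying column of the row, kept as a pair with i.
theorem pv_inner_loop (cols : Nat) (r : List Int) (i : Int) (lp : Option (Int × Int)) :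
    ((List.range cols).map (fun (j : Nat) => (j : Int))).foldl
      (fun lp j => if 100 < PySem.List.pyGetD r j 0 then some (i, j) else lp) lp
    = ((pvHits r cols).getLast?.map (fun j => (i, (j : Int)))).or lp := by
  induction cols generalizing lp with
  | zero => rfl
  | succ c ih =>
    rw [List.range_succ]
    simp only [List.map_append, List.foldl_append, ih]
    simp only [pvHits, List.range_succ, List.filter_append, List.map_cons, List.map_nil,
      List.foldl_cons, List.foldl_nil, PySem.List.pyGetD_natCast, List.filter_cons,
      List.filter_nil]
    by_cases h : 100 < r[c]?.getD 0
    · simp [h]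
    · simp [h]

-- A's whole scan keeps the last qualifying (i, j); viewed from the right it is the first
-- qualifying row of the reversed list with its last qualifying column.
theorem pv_foldl_or {α β : Type} (f : α → Option β) (l : List α) (init : Option β) :
    l.foldl (fun lp x => (f x).or lp) init = (l.reverse.findSome? f).or init := by
  induction l generalizing init with
  | nil => rfl
  | cons x t ih =>
    simp only [List.foldl_cons, ih, List.reverse_cons, List.findSome?_append,
      List.findSome?_cons, List.findSome?_nil]
    cases t.reverse.findSome? f <;> cases f x <;> rfl

theorem pv_scan_eq (xs : List (List Int)) (cols : Nat) :
    ((List.range xs.length).reverse.findSome?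
      (fun n => ((pvHits (xs.getD n []) cols).getLast?.map (fun j => ((n : Int), (j : Int)))))).map Prod.snd
    = (pvFindTarget xs.reverse cols).map (fun (j : Nat) => (j : Int)) := by
  rw [pvFindTarget_eq_findSome?]
  induction xs using List.reverseRecOn with
  | nil => rfl
  | append_singleton ys r ih =>
    rw [List.length_append, List.length_cons, List.length_nil, Nat.zero_add,
      List.range_succ, List.reverse_append, List.reverse_cons, List.reverse_nil,
      List.nil_append, List.cons_append, List.nil_append, List.findSome?_cons]
    have hget : (ys ++ [r]).getD ys.length [] = r := by
      simp [List.getD]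
    rw [hget, List.reverse_append, List.reverse_cons, List.reverse_nil, List.nil_append,
      List.cons_append, List.nil_append, List.findSome?_cons]
    cases h : (pvHits r cols).getLast? with
    | some j => simp
    | none =>
      rw [pv_findSome?_congr
        (fun n => ((pvHits ((ys ++ [r]).getD n []) cols).getLast?.map (fun j => ((n : Int), (j : Int)))))
        (fun n => ((pvHits (ys.getD n []) cols).getLast?.map (fun j => ((n : Int), (j : Int)))))
        _ (fun n hn => by
          have hlt : n < ys.length := by simpa using hn
          have hx : (ys ++ [r]).getD n [] = ys.getD n [] := by
            simp [List.getD, List.getElem?_append_left hlt]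
          simp only [hx])]
      exact ih

-- Pre_ guarantees B's reverse scan finds a target column.
theorem pv_target_some (xs : List (List Int)) (h : Pre_replace_colums xs) :
    ∃ t, pvFindTarget xs.reverse ((xs.headD []).length) = some t := by
  obtain ⟨-, -, -, row, hrow, v, hv, hv100⟩ := h
  rw [pvFindTarget_eq_findSome?]
  rcases hfs : xs.reverse.findSome? (fun r => (pvHits r ((xs.headD []).length)).getLast?) with _ | t
  · exfalso
    rw [List.findSome?_eq_none_iff] at hfs
    have hnone := hfs row (by simpa using hrow)
    rw [List.getLast?_eq_none_iff] at hnone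
    obtain ⟨j, hjlen, hjv⟩ := List.mem_take_iff_getElem.mp hv
    have hjr : j < row.length := lt_of_lt_of_le hjlen (min_le_right _ _)
    have hjcols : j < (xs.headD []).length := lt_of_lt_of_le hjlen (min_le_left _ _)
    have hmem : j ∈ pvHits row ((xs.headD []).length) := by
      simp only [pvHits, List.mem_filter, List.mem_range, decide_eq_true_eq]
      refine ⟨hjcols, ?_⟩
      rw [List.getD_eq_getElem?_getD, List.getElem?_eq_getElem hjr]
      simpa [hjv] using hv100
    rw [hnone] at hmem
    simp at hmem
  · exact ⟨t, rfl⟩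

-- One step of A's swap loop at an in-range index sets row n to its swapped version.
theorem pv_swap_step (acc : List (List Int)) (n tn : Nat) (hn : n < acc.length) :
    PySem.List.pySetD (PySem.List.pySetD acc (n : Int) (PySem.List.pySetD (PySem.List.pyGetD acc (n : Int) []) 1 (PySem.List.pyGetD (PySem.List.pyGetD acc (n : Int) []) (tn : Int) 0))) (n : Int) (PySem.List.pySetD (PySem.List.pyGetD (PySem.List.pySetD acc (n : Int) (PySem.List.pySetD (PySem.List.pyGetD acc (n : Int) []) 1 (PySem.List.pyGetD (PySem.List.pyGetD acc (n : Int) []) (tn : Int) 0))) (n : Int) []) (tn : Int) (PySem.List.pyGetD (PySem.List.pyGetD acc (n : Int) []) 1 0))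
    = acc.set n (pvSwapRow (acc.getD n []) tn) := by
  have h1 : (1 : Int) = ((1 : Nat) : Int) := by norm_num
  simp only [h1, PySem.List.pyGetD_natCast, PySem.List.pySetD_natCast]
  have hget : (acc.set n ((acc.getD n []).set 1 ((acc.getD n []).getD tn 0))).getD n []
      = (acc.getD n []).set 1 ((acc.getD n []).getD tn 0) := by
    simp [List.getD, hn]
  rw [hget, List.set_set]
  rfl

-- A's swap loop over range(rows) rebuilds the matrix as the map of per-row swaps.
theorem pv_swap_loop (tn : Nat) (n : Nat) (acc : List (List Int)) (hn : n ≤ acc.length) :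
    ((List.range n).map (fun (k : Nat) => (k : Int))).foldl
      (fun acc i =>
        PySem.List.pySetD (PySem.List.pySetD acc i (PySem.List.pySetD (PySem.List.pyGetD acc i []) 1 (PySem.List.pyGetD (PySem.List.pyGetD acc i []) (tn : Int) 0))) i (PySem.List.pySetD (PySem.List.pyGetD (PySem.List.pySetD acc i (PySem.List.pySetD (PySem.List.pyGetD acc i []) 1 (PySem.List.pyGetD (PySem.List.pyGetD acc i []) (tn : Int) 0))) i []) (tn : Int) (PySem.List.pyGetD (PySem.List.pyGetD acc i []) 1 0))) acc
    = (acc.take n).map (fun row => pvSwapRow row tn) ++ acc.drop n := by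
  induction n with
  | zero => simp
  | succ m ih =>
    rw [List.range_succ]
    simp only [List.map_append, List.map_cons, List.map_nil, List.foldl_append,
      List.foldl_cons, List.foldl_nil]
    rw [ih (Nat.le_of_succ_le hn)]
    have hm : m < acc.length := hn
    set B := (acc.take m).map (fun row => pvSwapRow row tn) ++ acc.drop m with hB
    have hlenB : m < B.length := by
      simp [hB, List.length_append, List.length_map, List.length_take, List.length_drop]
      omega
    rw [pv_swap_step B m tn hlenB]
    have hgetB : B.getD m [] = acc.getD m [] := by
      have : B.getD m [] = (acc.drop m).getD 0 [] := by
        simp [hB, List.getD, List.getElem?_append_right, List.length_map, List.length_take,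
          Nat.min_eq_left (Nat.le_of_lt hm)]
      rw [this]
      simp [List.getD, hm]
    rw [hgetB]
    have hdrop : acc.drop m = acc.getD m [] :: acc.drop (m + 1) := by
      rw [List.drop_eq_getElem_cons hm]
      simp [List.getD, List.getElem?_eq_getElem hm]
    rw [hB, hdrop]
    rw [List.set_append_right _ _ (by simp [Nat.min_eq_left (Nat.le_of_lt hm)])]
    simp only [List.length_map, List.length_take, Nat.min_eq_left (Nat.le_of_lt hm), Nat.sub_self,
      List.set_cons_zero]
    rw [List.take_add_one, List.getElem?_eq_getElem hm, List.map_append, List.append_assoc]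
    simp [List.getD, List.getElem?_eq_getElem hm]

-- With a found target column t, A's whole body is the per-row swap map.
theorem pv_A_eq (xs : List (List Int)) (t : Nat) (hx : xs ≠ [])
    (ht : pvFindTarget xs.reverse ((xs.headD []).length) = some t) :
    replace_colums xs = xs.map (fun row => pvSwapRow row t) := by
  have hcols : ((PySem.List.pyGet? xs 0).getD []) = xs.headD [] := by
    cases xs with
    | nil => exact absurd rfl hx
    | cons y ys => simp [PySem.List.pyGet?, PySem.List.pyIdx?]
  have hscan :
      ((List.range xs.length).map (fun (k : Nat) => (k : Int))).foldl
        (fun lp i => ((List.range (xs.headD []).length).map (fun (j : Nat) => (j : Int))).foldl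
          (fun lp j => if 100 < PySem.List.pyGetD (PySem.List.pyGetD xs i []) j 0 then some (i, j) else lp) lp)
        none
      = (List.range xs.length).reverse.findSome?
          (fun n => ((pvHits (xs.getD n []) ((xs.headD []).length)).getLast?.map (fun j => ((n : Int), (j : Int))))) := by
    rw [List.foldl_map]
    rw [PySem.List.foldl_congr_mem _ _
      (fun lp (n : Nat) => ((pvHits (xs.getD n []) ((xs.headD []).length)).getLast?.map (fun j => ((n : Int), (j : Int)))).or lp)
      _ (fun lp n _ => by rw [pv_inner_loop, PySem.List.pyGetD_natCast])]
    rw [pv_foldl_or, Option.or_none]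
  simp only [replace_colums, hcols, PySem.List.pyRange_zero_natCast]
  rw [hscan]
  have hsnd := pv_scan_eq xs ((xs.headD []).length)
  rw [ht, Option.map_some] at hsnd
  rw [hsnd]
  simp only [Option.getD_some]
  rw [pv_swap_loop t xs.length xs (Nat.le_refl _)]
  simp

theorem pv_B_eq (xs : List (List Int)) (t : Nat)
    (ht : pvFindTarget xs.reverse ((xs.headD []).length) = some t) :
    replace_colums_alt xs = xs.map (fun row => pvSwapRow row t) := by
  simp only [replace_colums_alt, ht]

-- ===== VERDICT (by name: the statement is the Claim_ definition above) =====
theorem replace_colums_spec : Claim_equal_replace_colums := by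
  intro xs _ hpre
  unfold Spec_replace_colums
  obtain ⟨t, ht⟩ := pv_target_some xs hpre
  rw [pv_A_eq xs t hpre.1 ht, pv_B_eq xs t ht]
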